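-- pv_equiv track=rewrite | github.com/milkmeat/leyitest | SLGrobot/vision/building_finder.py | _spiral_pattern
-- ===== SOURCE A (Python) =====
-- def _spiral_pattern(step_size: int,
--                     max_steps: int) -> list[tuple[int, int]]:
--     """Generate expanding spiral search swipe vectors.
--
--     Pattern: right, down, left*2, up*2, right*3, down*3, ...
--     """
--     directions = [(1, 0), (0, 1), (-1, 0), (0, -1)]  # R, D, L, U
--     pattern: list[tuple[int, int]] = []
--     steps_in_leg = 1
--     dir_idx = 0
--     turns = 0
--
--     while len(pattern) < max_steps:
--         ddx, ddy = directions[dir_idx % 4]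
--         for _ in range(steps_in_leg):
--             if len(pattern) >= max_steps:
--                 break
--             pattern.append((ddx * step_size, ddy * step_size))
--         dir_idx += 1
--         turns += 1
--         if turns % 2 == 0:
--             steps_in_leg += 1
--
--     return pattern
-- ===== SOURCE B (Python) =====
-- def _isqrt(n: int) -> int:
--     """Integer square root by binary search (no math import)."""
--     lo, hi = 0, n + 1
--     while hi - lo > 1:
--         mid = (lo + hi) // 2
--         if mid * mid <= n:
--             lo = mid
--         else:
--             hi = mid
--     return lo
--
--
-- def _vec(step_size: int, i: int) -> tuple[int, int]:
--     """Direction of swipe number i, computed directly from i.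
--
--     Leg lengths are 1,1,2,2,3,3,..., so leg boundaries are k*k and k*k+k:
--     with k = isqrt(i), index i lies in leg 2k-1 if i < k*k + k, else in leg 2k.
--     """
--     k = _isqrt(i)
--     leg = 2 * k - 1 if i < k * k + k else 2 * k
--     dx, dy = [(1, 0), (0, 1), (-1, 0), (0, -1)][leg % 4]
--     return (dx * step_size, dy * step_size)
--
--
-- def _spiral_pattern(step_size: int,
--                     max_steps: int) -> list[tuple[int, int]]:
--     """Generate expanding spiral search swipe vectors (closed form per index)."""
--     return [_vec(step_size, i) for i in range(max_steps)]
-- ===== Notes on version B (the rewrite author's own statement) =====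
-- stated objective: alternative
-- what changed: Replaced A's sequential loop state (pattern length, steps_in_leg, dir_idx, turns) by a random-access closed form: each swipe i is computed independently from its index via an integer square root (k = isqrt(i); leg = 2k-1 if i < k*k+k else 2k; direction = leg % 4), mapped over range(max_steps).
import Mathlib
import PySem

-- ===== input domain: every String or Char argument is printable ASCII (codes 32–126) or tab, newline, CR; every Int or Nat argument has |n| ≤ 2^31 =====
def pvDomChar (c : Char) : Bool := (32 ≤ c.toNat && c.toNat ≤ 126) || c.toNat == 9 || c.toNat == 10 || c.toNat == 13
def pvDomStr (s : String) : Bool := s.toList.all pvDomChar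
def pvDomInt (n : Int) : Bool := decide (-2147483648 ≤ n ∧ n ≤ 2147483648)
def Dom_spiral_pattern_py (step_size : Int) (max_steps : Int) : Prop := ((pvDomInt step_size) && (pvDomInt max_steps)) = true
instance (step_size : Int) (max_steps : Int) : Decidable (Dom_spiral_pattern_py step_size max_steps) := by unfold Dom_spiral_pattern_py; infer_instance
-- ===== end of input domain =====

-- B replaces A's sequential loop state (steps_in_leg/dir_idx/turns, per-element cap check) by a
-- random-access closed form: swipe i is computed independently from its index i via an integer
-- square root; objective: alternative (same output, different algorithm; not claimed faster).


-- ===== PORT A =====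
-- directions = [(1, 0), (0, 1), (-1, 0), (0, -1)]
def pvDirs : List (Int × Int) := [(1, 0), (0, 1), (-1, 0), (0, -1)]

-- inner 'for _ in range(steps_in_leg): if len(pattern) >= max_steps: break; pattern.append(v)'
def pvInnerA (v : Int × Int) (max_steps : Int) : Nat → List (Int × Int) → List (Int × Int)
  | 0, pattern => pattern
  | n + 1, pattern =>
      if (pattern.length : Int) ≥ max_steps then pattern
      else pvInnerA v max_steps n (pattern ++ [v])

-- outer 'while len(pattern) < max_steps' loop of A. The fuel argument only makes the loop a
-- structural recursion: every iteration taken with steps_in_leg ≥ 1 appends at least one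
-- element, so max_steps.toNat iterations (the value passed below) always suffice.
def pvOuterA (step_size max_steps : Int) :
    Nat → List (Int × Int) → Int → Int → Int → List (Int × Int)
  | 0, pattern, _, _, _ => pattern
  | fuel + 1, pattern, steps_in_leg, dir_idx, turns =>
      if (pattern.length : Int) < max_steps then
        -- ddx, ddy = directions[dir_idx % 4] (index always in range, getD never takes its
        -- default); the assignments d / pattern' are inlined into the recursive call
        pvOuterA step_size max_steps fuel
          (pvInnerA ((((PySem.List.pyGet? pvDirs (PySem.Int.mod dir_idx 4)).getD (0, 0)).1 * step_size,
                      ((PySem.List.pyGet? pvDirs (PySem.Int.mod dir_idx 4)).getD (0, 0)).2 * step_size))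
            max_steps steps_in_leg.toNat pattern)
          (if PySem.Int.mod (turns + 1) 2 = 0 then steps_in_leg + 1 else steps_in_leg)
          (dir_idx + 1) (turns + 1)
      else pattern

def spiral_pattern_py (step_size : Int) (max_steps : Int) : List (Int × Int) :=
  pvOuterA step_size max_steps max_steps.toNat [] 1 0 0

-- ===== PORT B =====
-- B's _isqrt: binary search 'lo, hi = 0, n+1; while hi - lo > 1: …'. All values are nonnegative
-- Python ints, so the port uses Nat. The fuel argument only makes the while loop structural:
-- the gap hi - lo shrinks every iteration, so n + 1 iterations always suffice.
def pvIsqrtAux (n : Nat) : Nat → Nat → Nat → Nat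
  | 0, lo, _ => lo
  | fuel + 1, lo, hi =>
      if hi - lo > 1 then
        let mid := (lo + hi) / 2
        if mid * mid ≤ n then pvIsqrtAux n fuel mid hi
        else pvIsqrtAux n fuel lo mid
      else lo

def pvIsqrt (n : Nat) : Nat := pvIsqrtAux n (n + 1) 0 (n + 1)

-- last two lines of B's _vec: '[(1,0),(0,1),(-1,0),(0,-1)][leg % 4]' scaled by step_size
def pvVecOf (step_size : Int) (leg : Nat) : Int × Int :=
  (((PySem.List.pyGet? pvDirs ((leg % 4 : Nat) : Int)).getD (0, 0)).1 * step_size,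
   ((PySem.List.pyGet? pvDirs ((leg % 4 : Nat) : Int)).getD (0, 0)).2 * step_size)

-- B's _vec(step_size, i): the swipe vector of index i in closed form (i = a range(max_steps)
-- index, hence a nonnegative Python int, ported as Nat; 2*k-1 is only taken with k ≥ 1).
def pvVecB (step_size : Int) (i : Nat) : Int × Int :=
  pvVecOf step_size (if i < pvIsqrt i * pvIsqrt i + pvIsqrt i then 2 * pvIsqrt i - 1 else 2 * pvIsqrt i)

-- '[_vec(step_size, i) for i in range(max_steps)]' (range(max_steps) = 0,…,max_steps-1; empty for max_steps ≤ 0)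
def spiral_pattern_py_alt (step_size : Int) (max_steps : Int) : List (Int × Int) :=
  (List.range max_steps.toNat).map (pvVecB step_size)

-- ===== PRECONDITION & SPEC =====
def Spec_spiral_pattern_py (step_size : Int) (max_steps : Int) (out : List (Int × Int)) : Prop := out = spiral_pattern_py_alt step_size max_steps
instance (step_size : Int) (max_steps : Int) (out : List (Int × Int)) : Decidable (Spec_spiral_pattern_py step_size max_steps out) := by unfold Spec_spiral_pattern_py; infer_instance

-- ===== CLAIM (what is proved, stated in full; the proofs are below) =====
def Claim_equal_spiral_pattern_py : Prop := ∀ (step_size : Int) (max_steps : Int), Dom_spiral_pattern_py step_size max_steps → Spec_spiral_pattern_py step_size max_steps (spiral_pattern_py step_size max_steps)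

-- ===== LEMMAS AND PROOFS =====

-- number of swipes produced by legs 0,…,L-1 (leg j has length j/2 + 1), in closed form
def pvCum (L : Nat) : Nat := if L % 2 = 0 then (L / 2) * (L / 2) + L / 2 else (L / 2 + 1) * (L / 2 + 1)

theorem pvCum_even (k : Nat) : pvCum (k + k) = k * k + k := by
  have h1 : (k + k) % 2 = 0 := by omega
  have h2 : (k + k) / 2 = k := by omega
  simp [pvCum, h1, h2]

theorem pvCum_odd (k : Nat) : pvCum (k + k + 1) = (k + 1) * (k + 1) := by
  have h1 : (k + k + 1) % 2 = 1 := by omega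
  have h2 : (k + k + 1) / 2 = k := by omega
  simp [pvCum, h1, h2]

theorem pvCum_succ (L : Nat) : pvCum (L + 1) = pvCum L + (L / 2 + 1) := by
  rcases Nat.even_or_odd L with ⟨k, hk⟩ | ⟨k, hk⟩
  · subst hk
    rw [pvCum_even, pvCum_odd]
    have : (k + k) / 2 = k := by omega
    rw [this]; ring
  · have hk' : L = k + k + 1 := by omega
    subst hk'
    have h1 : (k + k + 1 + 1) = (k + 1) + (k + 1) := by ring
    rw [h1, pvCum_even, pvCum_odd]
    have : (k + k + 1) / 2 = k := by omega
    rw [this]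

-- the binary search maintains lo*lo ≤ n < hi*hi and the gap is bounded by the fuel
theorem pvIsqrtAux_spec (n : Nat) : ∀ (fuel lo hi : Nat), lo < hi → hi ≤ lo + fuel + 1 →
    lo * lo ≤ n → n < hi * hi →
    pvIsqrtAux n fuel lo hi * pvIsqrtAux n fuel lo hi ≤ n ∧
      n < (pvIsqrtAux n fuel lo hi + 1) * (pvIsqrtAux n fuel lo hi + 1) := by
  intro fuel
  induction fuel with
  | zero =>
      intro lo hi h1 h2 h3 h4
      have : hi = lo + 1 := by omega
      subst this
      exact ⟨h3, h4⟩
  | succ fuel ih =>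
      intro lo hi h1 h2 h3 h4
      simp only [pvIsqrtAux]
      split
      · split
        · exact ih _ _ (by omega) (by omega) (by assumption) h4
        · exact ih _ _ (by omega) (by omega) h3 (by omega)
      · have : hi = lo + 1 := by omega
        subst this
        exact ⟨h3, h4⟩

theorem pvIsqrt_eq (n : Nat) : pvIsqrt n = Nat.sqrt n := by
  obtain ⟨h1, h2⟩ := pvIsqrtAux_spec n (n + 1) 0 (n + 1) (by omega) (by omega) (by omega) (by nlinarith)
  exact Nat.le_antisymm (Nat.le_sqrt.mpr h1) (Nat.lt_succ_iff.mp (Nat.sqrt_lt'.mpr (by rwa [pow_two])))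

-- B's closed-form leg index is the leg that A is walking at swipe i
theorem legOf_eq (L i : Nat) (h1 : pvCum L ≤ i) (h2 : i < pvCum (L + 1)) :
    (if i < pvIsqrt i * pvIsqrt i + pvIsqrt i then 2 * pvIsqrt i - 1 else 2 * pvIsqrt i) = L := by
  rw [pvIsqrt_eq]
  rcases Nat.even_or_odd L with ⟨k, hk⟩ | ⟨k, hk⟩
  · -- L = 2k: swipes [k*k+k, (k+1)*(k+1)), sqrt i = k
    subst hk
    rw [pvCum_even] at h1
    rw [pvCum_odd] at h2
    have hs : Nat.sqrt i = k :=
      Nat.le_antisymm (Nat.lt_succ_iff.mp (Nat.sqrt_lt'.mpr (by rw [pow_two]; omega)))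
        (Nat.le_sqrt.mpr (by omega))
    rw [hs]
    have hno : ¬ i < k * k + k := by omega
    rw [if_neg hno]; omega
  · -- L = 2k+1: swipes [(k+1)*(k+1), (k+1)*(k+1)+(k+1)), sqrt i = k+1
    have hk' : L = k + k + 1 := by omega
    subst hk'
    rw [pvCum_odd] at h1
    have h1' : (k + k + 1 + 1) = (k + 1) + (k + 1) := by ring
    rw [h1', pvCum_even] at h2
    have hs : Nat.sqrt i = k + 1 :=
      Nat.le_antisymm (Nat.lt_succ_iff.mp (Nat.sqrt_lt'.mpr (by rw [pow_two]; nlinarith)))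
        (Nat.le_sqrt.mpr h1)
    rw [hs]
    have hyes : i < (k + 1) * (k + 1) + (k + 1) := by omega
    rw [if_pos hyes]; omega

-- hence B's element at index i inside leg L is exactly the vector A appends during leg L
theorem pvVecB_in_leg (s : Int) (L i : Nat) (h1 : pvCum L ≤ i) (h2 : i < pvCum (L + 1)) :
    pvVecB s i =
      (((PySem.List.pyGet? pvDirs (PySem.Int.mod (L : Int) 4)).getD (0, 0)).1 * s,
       ((PySem.List.pyGet? pvDirs (PySem.Int.mod (L : Int) 4)).getD (0, 0)).2 * s) := by
  unfold pvVecB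
  rw [legOf_eq L i h1 h2]
  have hm : PySem.Int.mod (L : Int) 4 = ((L % 4 : Nat) : Int) := by
    rw [PySem.Int.mod_eq_emod_of_pos (by omega)]
    omega
  rw [pvVecOf, hm]

-- A's inner for loop appends exactly min(steps_in_leg, room) copies of v.
theorem pvInnerA_eq_replicate (v : Int × Int) (max_steps : Int) :
    ∀ (n : Nat) (p : List (Int × Int)),
      pvInnerA v max_steps n p = p ++ List.replicate (min n (max_steps - p.length).toNat) v := by
  intro n
  induction n with
  | zero => intro p; simp [pvInnerA]
  | succ n ih =>
      intro p
      simp only [pvInnerA]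
      split
      · have : (max_steps - (p.length : Int)).toNat = 0 := by omega
        simp [this]
      · rw [ih (p ++ [v])]
        have hm : min (n + 1) (max_steps - (p.length : Int)).toNat
            = min n (max_steps - ((p ++ [v]).length : Int)).toNat + 1 := by
          simp only [List.length_append, List.length_singleton]
          omega
        rw [hm, List.replicate_succ, List.append_assoc]
        rfl

-- core simulation: after legs 0,…,L-1 A's pattern is B's first min(pvCum L, max) elements and
-- A's counters are determined by L (steps_in_leg = L/2+1, dir_idx = turns = L); each taken
-- iteration appends ≥ 1 element, so fuel ≥ max - pvCum L suffices to finish.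
theorem loopA_eq (s m : Int) :
    ∀ (fuel L : Nat), m.toNat ≤ pvCum L + fuel →
      pvOuterA s m fuel ((List.range (min (pvCum L) m.toNat)).map (pvVecB s))
          ((L / 2 : Nat) + 1) (L : Int) (L : Int)
        = (List.range m.toNat).map (pvVecB s) := by
  intro fuel
  induction fuel with
  | zero =>
      intro L h
      have : min (pvCum L) m.toNat = m.toNat := by omega
      rw [this]; rfl
  | succ fuel ih =>
      intro L h
      rw [pvOuterA]
      by_cases hlt : pvCum L < m.toNat
      · have hmin : min (pvCum L) m.toNat = pvCum L := by omega
        have hcond : (((List.range (min (pvCum L) m.toNat)).map (pvVecB s)).length : Int) < m := by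
          simp [hmin]; omega
        rw [if_pos hcond]
        have hlen : ((L / 2 : Nat) + 1 : Int).toNat = L / 2 + 1 := by omega
        rw [pvInnerA_eq_replicate, hlen]
        -- the appended block is B's elements pvCum L, …, min(pvCum (L+1), max) - 1
        have hroom : (m - (((List.range (min (pvCum L) m.toNat)).map (pvVecB s)).length : Int)).toNat
            = m.toNat - pvCum L := by
          simp only [List.length_map, List.length_range, hmin]
          omega
        rw [hroom]
        set cnt := min (L / 2 + 1) (m.toNat - pvCum L) with hcnt
        have hblock :
            (List.range (min (pvCum L) m.toNat)).map (pvVecB s) ++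
              List.replicate cnt
                ((((PySem.List.pyGet? pvDirs (PySem.Int.mod (L : Int) 4)).getD (0, 0)).1 * s),
                 (((PySem.List.pyGet? pvDirs (PySem.Int.mod (L : Int) 4)).getD (0, 0)).2 * s))
            = (List.range (min (pvCum (L + 1)) m.toNat)).map (pvVecB s) := by
          have hsplit : min (pvCum (L + 1)) m.toNat = pvCum L + cnt := by
            rw [pvCum_succ]; omega
          rw [hsplit, List.range_add, List.map_append, hmin]
          congr 1
          rw [List.map_map]
          refine (List.eq_replicate_iff.mpr ⟨by simp, ?_⟩).symm
          intro b hb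
          simp only [List.mem_map, List.mem_range] at hb
          obtain ⟨j, hj, rfl⟩ := hb
          exact pvVecB_in_leg s L (pvCum L + j) (by omega) (by rw [pvCum_succ]; omega)
        simp only [hblock]
        -- A's counter update matches the closed form for leg L+1
        have hturn : PySem.Int.mod ((L : Int) + 1) 2 = (((L + 1) % 2 : Nat) : Int) := by
          rw [PySem.Int.mod_eq_emod_of_pos (by omega)]; omega
        have hstep : (if PySem.Int.mod ((L : Int) + 1) 2 = 0 then ((L / 2 : Nat) : Int) + 1 + 1
            else ((L / 2 : Nat) : Int) + 1) = (((L + 1) / 2 : Nat) : Int) + 1 := by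
          rw [hturn]; split_ifs with hp <;> omega
        rw [hstep]
        have hnext := ih (L + 1) (by rw [pvCum_succ]; omega)
        have hc : ((L + 1 : Nat) : Int) = (L : Int) + 1 := by omega
        rw [hc] at hnext
        exact hnext
      · have hmin : min (pvCum L) m.toNat = m.toNat := by omega
        rw [hmin]
        have hcond : ¬ ((((List.range m.toNat).map (pvVecB s)).length : Int) < m) := by
          simp only [List.length_map, List.length_range]; omega
        rw [if_neg hcond]

-- ===== VERDICT (by name: the statement is the Claim_ definition above) =====
theorem spiral_pattern_py_spec : Claim_equal_spiral_pattern_py := by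
  intro s m _
  unfold Spec_spiral_pattern_py spiral_pattern_py spiral_pattern_py_alt
  have h := loopA_eq s m m.toNat 0 (by simp [pvCum])
  simpa [pvCum] using h
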